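-- pv_equiv track=rewrite | github.com/vossrf/MTG6418 | DM_Graphs.py | isTran
-- ===== SOURCE A (Python) =====
-- def isTran(r):
--     "decide if every 2-step connection also has a 1-step shortcut"
--     out = {}    # empty dictionary of connections leaving each node
--     for n1,n2 in r:               # assign pair connections to out
--         if n2==None: continue
--         if n1 in out:
--             out[n1].add(n2)       # add new outgoing node
--         else:                     # initial outgoing node
--             out[n1] = set((n2,))
--         if n2 not in out:         # make sure n2 in out dictionary
--             out[n2] = set()
--     for n1 in out:                # all possible starting nodes
--         for n2 in out[n1]:        # all possible 1-step destinations
--             for n3 in out[n2]:    # all 3-step destinations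
--                 if n3 not in out[n1]: # no direct connection from n1
--                     return False
--     return True                   # no 2-step without 1-step
-- ===== SOURCE B (Python) =====
-- def isTran(r):
--     "decide if every 2-step connection also has a 1-step shortcut"
--     s = {(a, b) for a, b in r if b is not None}
--     for (a, b) in s:
--         for (c, d) in s:
--             if c == b and (a, d) not in s:
--                 return False
--     return True
-- ===== Notes on version B (the rewrite author's own statement) =====
-- stated objective: simpler
-- what changed: Replaces the adjacency dictionary with three nested loops by a flat set of edge pairs scanned with a double loop that joins pairs on the middle node.
import Mathlib
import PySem

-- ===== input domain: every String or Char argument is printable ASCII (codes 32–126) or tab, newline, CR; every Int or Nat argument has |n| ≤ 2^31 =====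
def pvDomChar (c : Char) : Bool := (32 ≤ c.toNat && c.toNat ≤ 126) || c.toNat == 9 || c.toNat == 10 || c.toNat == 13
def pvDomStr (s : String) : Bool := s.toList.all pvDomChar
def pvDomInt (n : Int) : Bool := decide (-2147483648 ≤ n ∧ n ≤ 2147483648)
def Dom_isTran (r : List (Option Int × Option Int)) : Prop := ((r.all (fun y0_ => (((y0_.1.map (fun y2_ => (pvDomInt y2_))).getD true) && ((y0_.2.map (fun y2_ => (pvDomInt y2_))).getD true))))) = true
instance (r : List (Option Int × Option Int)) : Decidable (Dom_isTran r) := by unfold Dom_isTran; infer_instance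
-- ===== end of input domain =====

-- B replaces A's adjacency dictionary and triple nested loop by a flat set of
-- edge pairs checked with a double loop joined on the middle node (simpler).


-- ===== PORT A =====
-- one iteration of A's first loop (assign pair connections to out; skip n2 == None)
def isTranStep (out : PySem.Dict (Option Int) (PySem.Set (Option Int)))
    (p : Option Int × Option Int) : PySem.Dict (Option Int) (PySem.Set (Option Int)) :=
  if p.2 = none then out
  else
    let out :=
      if out.contains p.1 then
        out.insert p.1 (PySem.Set.add (out.getD p.1 PySem.Set.empty) p.2)
      else
        out.insert p.1 (PySem.Set.ofList [p.2])
    if out.contains p.2 then out else out.insert p.2 PySem.Set.empty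

-- the triple loop with early 'return False' is the nested .all over keys / out[n1] / out[n2]
def isTran (r : List (Option Int × Option Int)) : Bool :=
  let out := r.foldl isTranStep PySem.Dict.empty
  out.keys.all (fun n1 =>
    (out.getD n1 PySem.Set.empty).all (fun n2 =>
      (out.getD n2 PySem.Set.empty).all (fun n3 =>
        PySem.Set.contains (out.getD n1 PySem.Set.empty) n3)))

-- ===== PORT B =====
def isTran_alt (r : List (Option Int × Option Int)) : Bool :=
  let s : PySem.Set (Option Int × Option Int) :=
    PySem.Set.ofList (r.filter (fun p => p.2 ≠ none))
  s.all (fun p => s.all (fun q =>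
    !(decide (q.1 = p.2) && !(PySem.Set.contains s (p.1, q.2)))))

-- ===== PRECONDITION & SPEC =====
def Spec_isTran (r : List (Option Int × Option Int)) (out : Bool) : Prop := out = isTran_alt r
instance (r : List (Option Int × Option Int)) (out : Bool) : Decidable (Spec_isTran r out) := by unfold Spec_isTran; infer_instance

-- ===== CLAIM (what is proved, stated in full; the proofs are below) =====
def Claim_equal_isTran : Prop := ∀ (r : List (Option Int × Option Int)), Dom_isTran r → Spec_isTran r (isTran r)

-- ===== LEMMAS AND PROOFS =====

lemma getD_of_not_contains {κ ν : Type} [BEq κ] [LawfulBEq κ]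
    (d : PySem.Dict κ ν) (k : κ) (dflt : ν) (h : ¬ d.contains k = true) :
    d.getD k dflt = dflt := by
  have hk : d.get? k = none := by
    rw [PySem.Dict.get?_eq_none_iff_not_mem_keys]
    exact fun hm => h ((PySem.Dict.contains_iff_mem_keys d k).mpr hm)
  simp [PySem.Dict.getD, hk]

-- membership after A's 'out[n1].add(n2)' / 'out[n1] = set((n2,))' branch
lemma mem_getD_addEdge (d : PySem.Dict (Option Int) (PySem.Set (Option Int)))
    (p1 v a x : Option Int) :
    (x ∈ ((if d.contains p1 then
        d.insert p1 (PySem.Set.add (d.getD p1 PySem.Set.empty) v)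
      else d.insert p1 (PySem.Set.ofList [v])).getD a PySem.Set.empty)
      ↔ x ∈ d.getD a PySem.Set.empty ∨ (a = p1 ∧ x = v)) := by
  by_cases ha : a = p1
  · subst ha
    by_cases hc : d.contains a = true
    · rw [if_pos hc, PySem.Dict.getD_insert_self, PySem.Set.mem_add]
      simp
    · rw [if_neg hc, PySem.Dict.getD_insert_self, getD_of_not_contains d a _ hc]
      simp [PySem.Set.mem_ofList, PySem.Set.empty]
  · by_cases hc : d.contains p1 = true
    · rw [if_pos hc, PySem.Dict.getD_insert_of_ne _ _ _ ha]; simp [ha]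
    · rw [if_neg hc, PySem.Dict.getD_insert_of_ne _ _ _ ha]; simp [ha]

-- membership after A's "if n2 not in out: out[n2] = set()" branch
lemma mem_getD_ensureKey (d : PySem.Dict (Option Int) (PySem.Set (Option Int)))
    (k a x : Option Int) :
    (x ∈ ((if d.contains k then d else d.insert k PySem.Set.empty).getD a PySem.Set.empty)
      ↔ x ∈ d.getD a PySem.Set.empty) := by
  by_cases hc : d.contains k = true
  · rw [if_pos hc]
  · rw [if_neg hc]
    by_cases ha : a = k
    · subst ha
      rw [PySem.Dict.getD_insert_self, getD_of_not_contains d a _ hc]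
    · rw [PySem.Dict.getD_insert_of_ne _ _ _ ha]

lemma isTranStep_mem (d : PySem.Dict (Option Int) (PySem.Set (Option Int)))
    (p : Option Int × Option Int) (a b : Option Int) :
    (b ∈ (isTranStep d p).getD a PySem.Set.empty
      ↔ b ∈ d.getD a PySem.Set.empty ∨ (p.2 ≠ none ∧ a = p.1 ∧ b = p.2)) := by
  rcases p with ⟨p1, p2⟩
  cases p2 with
  | none => simp [isTranStep]
  | some v =>
    rw [isTranStep, if_neg (by simp)]
    simp only []
    rw [mem_getD_ensureKey, mem_getD_addEdge]
    simp

-- A's first loop builds exactly the membership relation of the None-filtered edge list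
lemma isTranOut_mem (r : List (Option Int × Option Int))
    (d : PySem.Dict (Option Int) (PySem.Set (Option Int))) (a b : Option Int) :
    (b ∈ (r.foldl isTranStep d).getD a PySem.Set.empty
      ↔ b ∈ d.getD a PySem.Set.empty ∨ (a, b) ∈ r.filter (fun p => p.2 ≠ none)) := by
  induction r generalizing d with
  | nil => simp
  | cons p t ih =>
    rcases p with ⟨p1, p2⟩
    simp only [List.foldl_cons, ih, isTranStep_mem, List.filter_cons]
    by_cases hp : p2 = none
    · simp [hp]
    · simp [hp, Prod.ext_iff]
      tauto

lemma isTran_iff (r : List (Option Int × Option Int)) :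
    (isTran r = true ↔
      ∀ a b, (a, b) ∈ r.filter (fun p => p.2 ≠ none) →
        ∀ d, (b, d) ∈ r.filter (fun p => p.2 ≠ none) →
          (a, d) ∈ r.filter (fun p => p.2 ≠ none)) := by
  have hempty : ∀ a : Option Int, (PySem.Dict.empty : PySem.Dict (Option Int) (PySem.Set (Option Int))).getD a PySem.Set.empty = PySem.Set.empty := by
    intro a; rfl
  have hmem : ∀ a b, (b ∈ (r.foldl isTranStep PySem.Dict.empty).getD a PySem.Set.empty
      ↔ (a, b) ∈ r.filter (fun p => p.2 ≠ none)) := by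
    intro a b
    rw [isTranOut_mem, hempty]
    simp [PySem.Set.empty]
  simp only [isTran, List.all_eq_true, PySem.Set.contains_iff]
  constructor
  · intro h a b hab d hbd
    have ha : a ∈ (r.foldl isTranStep PySem.Dict.empty).keys := by
      by_contra hk
      have hz : (r.foldl isTranStep PySem.Dict.empty).getD a PySem.Set.empty = PySem.Set.empty :=
        getD_of_not_contains _ _ _ (fun hc => hk ((PySem.Dict.contains_iff_mem_keys _ _).mp hc))
      have hb := (hmem a b).mpr hab
      rw [hz] at hb
      simp [PySem.Set.empty] at hb
    exact (hmem a d).mp (h a ha b ((hmem a b).mpr hab) d ((hmem b d).mpr hbd))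
  · intro h n1 _ n2 h2 n3 h3
    exact (hmem n1 n3).mpr (h n1 n2 ((hmem n1 n2).mp h2) n3 ((hmem n2 n3).mp h3))

lemma isTran_alt_iff (r : List (Option Int × Option Int)) :
    (isTran_alt r = true ↔
      ∀ a b, (a, b) ∈ r.filter (fun p => p.2 ≠ none) →
        ∀ d, (b, d) ∈ r.filter (fun p => p.2 ≠ none) →
          (a, d) ∈ r.filter (fun p => p.2 ≠ none)) := by
  simp only [isTran_alt, List.all_eq_true, Bool.not_eq_eq_eq_not, Bool.not_true,
    Bool.and_eq_false_iff, decide_eq_false_iff_not, Bool.not_false,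
    PySem.Set.contains_iff, PySem.Set.mem_ofList]
  constructor
  · intro h a b hab d hbd
    rcases h (a, b) hab (b, d) hbd with h' | h'
    · simp at h'
    · simpa using h'
  · rintro h ⟨a, b⟩ hab ⟨c, d⟩ hcd
    by_cases he : c = b
    · exact Or.inr (by simpa using h a b hab d (he ▸ hcd))
    · exact Or.inl he

-- ===== VERDICT (by name: the statement is the Claim_ definition above) =====
theorem isTran_spec : Claim_equal_isTran := by
  intro r _
  show isTran r = isTran_alt r
  rw [Bool.eq_iff_iff, isTran_iff, isTran_alt_iff]
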